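-- pv_equiv track=rewrite | github.com/k6qybsxt/edinet-tool | src/edinet_pipeline/domain/year_shift.py | shift_suffixes_by_yeargap
-- ===== SOURCE A (Python) =====
-- def shift_suffixes_by_yeargap(key: str, year_gap: int):
--     if not isinstance(key, str):
--         return key
--
--     suffixes = ["Current", "Prior1", "Prior2", "Prior3", "Prior4"]
--     if year_gap <= 0:
--         return key
--
--     for i, suffix in enumerate(suffixes):
--         if key.endswith(suffix):
--             new_index = i + year_gap
--             if new_index >= len(suffixes):
--                 return None
--             return key[:-len(suffix)] + suffixes[new_index]
--
--     return key
-- ===== SOURCE B (Python) =====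
-- def shift_suffixes_by_yeargap(key: str, year_gap: int):
--     if not isinstance(key, str) or year_gap <= 0:
--         return key
--     suffixes = ["Current", "Prior1", "Prior2", "Prior3", "Prior4"]
--     if key.endswith("Current"):
--         idx, cut = 0, 7
--     elif key and key[-1] in "1234" and key[:-1].endswith("Prior"):
--         idx, cut = int(key[-1]), 6
--     else:
--         return key
--     new_index = idx + year_gap
--     if new_index >= 5:
--         return None
--     return key[:-cut] + suffixes[new_index]
-- ===== Notes on version B (the rewrite author's own statement) =====
-- stated objective: alternative
-- what changed: Replaces the enumerate-scan over the five suffixes by a direct computation of the source index: one endswith('Current') test, otherwise read the last character as the Prior digit and check the 'Prior' stem once, then shift arithmetically.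
import Mathlib
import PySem

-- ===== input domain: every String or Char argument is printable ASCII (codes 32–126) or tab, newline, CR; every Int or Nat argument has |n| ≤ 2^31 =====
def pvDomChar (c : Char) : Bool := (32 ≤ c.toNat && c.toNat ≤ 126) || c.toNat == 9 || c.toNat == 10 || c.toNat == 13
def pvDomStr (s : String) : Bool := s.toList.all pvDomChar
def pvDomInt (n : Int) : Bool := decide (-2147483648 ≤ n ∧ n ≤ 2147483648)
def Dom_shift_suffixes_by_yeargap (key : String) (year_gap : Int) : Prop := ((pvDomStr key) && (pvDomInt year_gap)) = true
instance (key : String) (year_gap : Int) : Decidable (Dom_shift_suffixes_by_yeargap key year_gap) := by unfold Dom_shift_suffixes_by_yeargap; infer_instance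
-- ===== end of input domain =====

-- B replaces A's enumerate-scan over the five suffixes by a direct index computation
-- (one 'Current' test, else read the trailing Prior digit); same cost class, different decomposition.

-- ===== PORT A =====
def pvSuffixes : List String := ["Current", "Prior1", "Prior2", "Prior3", "Prior4"]

-- the 'for i, suffix in enumerate(suffixes)' loop with its early returns
def pvLoopA (key : String) (year_gap : Int) : List (Int × String) → Option String
  | [] => some key
  | (i, suffix) :: rest =>
    if PySem.Str.endswith key suffix then
      if (5:Int) ≤ i + year_gap then none
      else some (String.ofList
        (PySem.Chars.slice key.toList none (some (-(PySem.Str.len suffix : Int))) ++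
          (PySem.List.pyGetD pvSuffixes (i + year_gap) "").toList))
    else pvLoopA key year_gap rest

def shift_suffixes_by_yeargap (key : String) (year_gap : Int) : Option String :=
  if year_gap ≤ 0 then some key
  else pvLoopA key year_gap (PySem.List.enumerate pvSuffixes 0)

-- ===== PORT B =====
def shift_suffixes_by_yeargap_alt (key : String) (year_gap : Int) : Option String :=
  if year_gap ≤ 0 then some key
  else
    let cs := key.toList
    let idxcut : Option (Int × Nat) :=
      if PySem.Chars.endswith cs "Current".toList then some (0, 7)
      else
        match cs.getLast? with
        | none => none
        | some c =>
          if c ∈ ['1', '2', '3', '4'] ∧ PySem.Chars.endswith cs.dropLast "Prior".toList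
          then some (((c.toNat - '0'.toNat : Nat) : Int), 6)
          else none
    match idxcut with
    | none => some key
    | some (idx, cut) =>
      if (5:Int) ≤ idx + year_gap then none
      else some (String.ofList
        (cs.take (cs.length - cut) ++ (PySem.List.pyGetD pvSuffixes (idx + year_gap) "").toList))

-- ===== PRECONDITION & SPEC =====
def Spec_shift_suffixes_by_yeargap (key : String) (year_gap : Int) (out : Option String) : Prop := out = shift_suffixes_by_yeargap_alt key year_gap
instance (key : String) (year_gap : Int) (out : Option String) : Decidable (Spec_shift_suffixes_by_yeargap key year_gap out) := by unfold Spec_shift_suffixes_by_yeargap; infer_instance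

-- ===== CLAIM (what is proved, stated in full; the proofs are below) =====
def Claim_equal_shift_suffixes_by_yeargap : Prop := ∀ (key : String) (year_gap : Int), Dom_shift_suffixes_by_yeargap key year_gap → Spec_shift_suffixes_by_yeargap key year_gap (shift_suffixes_by_yeargap key year_gap)

-- ===== LEMMAS AND PROOFS =====

-- a snoc suffix matches iff the last element matches and the stem is a suffix of the rest
theorem pv_suffix_snoc_iff {α : Type} (p : List α) (c : α) (cs : List α) :
    (p ++ [c]) <:+ cs ↔ cs.getLast? = some c ∧ p <:+ cs.dropLast := by
  constructor
  · rintro ⟨t, rfl⟩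
    exact ⟨by simp, t, by simp⟩
  · rintro ⟨hlast, t, ht⟩
    have hne : cs ≠ [] := by rintro rfl; simp at hlast
    have hgl : cs.getLast hne = c := by
      rw [List.getLast?_eq_some_getLast hne, Option.some.injEq] at hlast; exact hlast
    refine ⟨t, ?_⟩
    calc t ++ (p ++ [c]) = (t ++ p) ++ [c] := by simp
      _ = cs.dropLast ++ [cs.getLast hne] := by rw [ht, hgl]
      _ = cs := List.dropLast_append_getLast hne

theorem pv_endswith_snoc (key : String) (p : List Char) (c : Char) :
    PySem.Chars.endswith key.toList (p ++ [c]) = true ↔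
      key.toList.getLast? = some c ∧ PySem.Chars.endswith key.toList.dropLast p = true := by
  rw [PySem.Chars.endswith_iff, PySem.Chars.endswith_iff, pv_suffix_snoc_iff]

-- ===== VERDICT (by name: the statement is the Claim_ definition above) =====
theorem shift_suffixes_by_yeargap_spec : Claim_equal_shift_suffixes_by_yeargap := by
  intro key year_gap _
  unfold Spec_shift_suffixes_by_yeargap shift_suffixes_by_yeargap shift_suffixes_by_yeargap_alt
  by_cases hgap : year_gap ≤ 0
  · simp [hgap]
  · simp only [hgap, if_false]
    have henum : PySem.List.enumerate pvSuffixes 0 =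
        [((0:Int), "Current"), (1, "Prior1"), (2, "Prior2"), (3, "Prior3"), (4, "Prior4")] := by
      decide
    rw [henum]
    by_cases hcur : PySem.Chars.endswith key.toList "Current".toList = true
    · -- Current branch
      simp only [pvLoopA, PySem.Str.endswith_eq, hcur, if_true]
      have h7 : PySem.Str.len "Current" = (7:Int) := by decide
      rw [h7]
      simp only [PySem.Chars.slice_eq_listSlice]
      rw [PySem.List.slice_to_neg_ofNat key.toList 7 (by omega)]
    · -- not Current: compare the Prior scan with the digit test
      simp only [pvLoopA, PySem.Str.endswith_eq, hcur]
      cases hl : key.toList.getLast? with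
      | none =>
        -- empty string: no Prior suffix matches
        have he : key.toList = [] := by
          cases h : key.toList with
          | nil => rfl
          | cons a l => rw [h] at hl; simp [List.getLast?_eq_some_getLast] at hl
        have hfall : ∀ p : List Char, p ≠ [] → PySem.Chars.endswith key.toList p = false := by
          intro p hpne
          rw [← Bool.not_eq_true, PySem.Chars.endswith_iff, he]
          intro h; exact hpne (List.suffix_nil.mp h)
        simp [hfall ['P','r','i','o','r','1'] (by decide),
          hfall ['P','r','i','o','r','2'] (by decide),
          hfall ['P','r','i','o','r','3'] (by decide),
          hfall ['P','r','i','o','r','4'] (by decide)]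
      | some c =>
        by_cases hp : PySem.Chars.endswith key.toList.dropLast ['P','r','i','o','r'] = true
        · -- stem matches: matching a Prior suffix is exactly matching its digit
          have hei : ∀ d : Char,
              PySem.Chars.endswith key.toList ('P'::'r'::'i'::'o'::'r'::[d]) = true ↔ c = d := by
            intro d
            rw [show ('P'::'r'::'i'::'o'::'r'::[d]) = ['P','r','i','o','r'] ++ [d] from rfl,
              pv_endswith_snoc, hl]
            simp [hp]
          have hsl := PySem.List.slice_to_neg_ofNat key.toList 6 (by omega)
          by_cases hc1 : c = '1'
          · subst hc1
            simp [hp, (hei '1').mpr rfl, hsl]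
          · by_cases hc2 : c = '2'
            · subst hc2
              simp [hp, hei, (hei '2').mpr rfl, hc1, hsl]
            · by_cases hc3 : c = '3'
              · subst hc3
                simp [hp, hei, (hei '3').mpr rfl, hc1, hc2, hsl]
              · by_cases hc4 : c = '4'
                · subst hc4
                  simp [hp, hei, (hei '4').mpr rfl, hc1, hc2, hc3, hsl]
                · -- last char is not a Prior digit: everything falls through
                  simp [hp, hei, hc1, hc2, hc3, hc4]
        · -- stem does not match: no Prior suffix matches
          have he : ∀ d : Char,
              PySem.Chars.endswith key.toList ('P'::'r'::'i'::'o'::'r'::[d]) = false := by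
            intro d
            rw [← Bool.not_eq_true,
              show ('P'::'r'::'i'::'o'::'r'::[d]) = ['P','r','i','o','r'] ++ [d] from rfl,
              pv_endswith_snoc]
            rintro ⟨-, h⟩; exact hp h
          simp [he '1', he '2', he '3', he '4', hp]
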